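-- pv_equiv track=rewrite | github.com/Angshumanbhowmick12/email_extract | prompts.py | get_port_reference_text
-- ===== SOURCE A (Python) =====
-- from typing import List, Dict
--
-- def get_port_reference_text(ports: List[Dict[str, str]], max_ports: int = 30) -> str:
--     """
--     Format port reference for inclusion in prompt.
--     Limits to most common ports to save tokens.
--     """
--     # Group by code to show variations
--     port_map = {}
--     for port in ports:
--         code = port['code']
--         name = port['name']
--         if code not in port_map:
--             port_map[code] = []
--         if name not in port_map[code]:
--             port_map[code].append(name)
--
--     # Format as readable list
--     lines = []
--     for code, names in sorted(port_map.items())[:max_ports]: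
--         if len(names) == 1:
--             lines.append(f"- {code}: {names[0]}")
--         else:
--             lines.append(f"- {code}: {', '.join(names)}")
--
--     return "\n".join(lines)
-- ===== SOURCE B (Python) =====
-- def get_port_reference_text(ports, max_ports=30):
--     # No intermediate dict: sorted distinct codes, then one filtered dedup scan per code.
--     codes = sorted({p['code'] for p in ports})[:max_ports]
--     lines = []
--     for code in codes:
--         seen = []
--         for p in ports:
--             if p['code'] == code and p['name'] not in seen:
--                 seen.append(p['name'])
--         lines.append(f"- {code}: {', '.join(seen)}")
--     return "\n".join(lines)
-- ===== Notes on version B (the rewrite author's own statement) =====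
-- stated objective: alternative
-- what changed: B drops A's incrementally built dict of name lists entirely: it sorts the distinct codes once, then for each kept code makes one filtered dedup pass over the ports list, formatting directly.
import Mathlib
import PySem

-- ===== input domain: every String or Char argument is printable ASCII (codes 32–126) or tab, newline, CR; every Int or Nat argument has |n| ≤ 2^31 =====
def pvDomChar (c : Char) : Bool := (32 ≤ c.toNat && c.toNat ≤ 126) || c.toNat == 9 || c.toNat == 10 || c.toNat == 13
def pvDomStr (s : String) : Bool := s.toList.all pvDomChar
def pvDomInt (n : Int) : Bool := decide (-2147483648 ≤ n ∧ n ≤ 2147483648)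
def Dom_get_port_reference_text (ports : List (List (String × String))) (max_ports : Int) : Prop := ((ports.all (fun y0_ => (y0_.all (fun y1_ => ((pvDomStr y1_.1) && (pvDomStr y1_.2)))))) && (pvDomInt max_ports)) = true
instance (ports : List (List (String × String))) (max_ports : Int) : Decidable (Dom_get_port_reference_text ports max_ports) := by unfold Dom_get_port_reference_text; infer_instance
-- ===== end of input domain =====

-- B replaces A's incrementally-built dict of name lists by direct per-code scans: sorted distinct
-- codes first, then one filtered dedup pass over the ports per kept code (objective: alternative, not faster).

-- ===== PORT A =====
-- port_map loop of A; port['code'] / port['name'] are first-match lookups, none = KeyError (outside Pre_).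
def pvAStep (m : PySem.Dict String (List String)) (code name : String) : PySem.Dict String (List String) :=
  let m := if m.contains code then m else m.insert code []   -- if code not in port_map: port_map[code] = []
  let names := m.getD code []
  if name ∈ names then m else m.insert code (names ++ [name])  -- if name not in port_map[code]: append

def pvABuild : List (List (String × String)) → PySem.Dict String (List String) → Option (PySem.Dict String (List String))
  | [], m => some m
  | port :: rest, m =>
    match (PySem.Dict.mk port).get? "code", (PySem.Dict.mk port).get? "name" with
    | some code, some name => pvABuild rest (pvAStep m code name)
    | _, _ => none

-- one line of A's second loop (the len == 1 branch uses names[0])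
def pvALine (p : String × List String) : String :=
  if p.2.length = 1 then "- " ++ p.1 ++ ": " ++ ((PySem.List.pyGet? p.2 0).getD "")
  else "- " ++ p.1 ++ ": " ++ PySem.Str.join ", " p.2

def get_port_reference_text (ports : List (List (String × String))) (max_ports : Int) : String :=
  match pvABuild ports PySem.Dict.empty with
  | none => ""   -- KeyError in the first loop; excluded by Pre_
  | some m =>
    -- sorted(port_map.items()): tuple comparison, decided by the (distinct) keys
    let entries := PySem.List.slice (PySem.List.sorted m.items (fun p => p.1) false) none (some max_ports)
    PySem.Str.join "\n" (entries.map pvALine)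

-- ===== PORT B =====
-- {p['code'] for p in ports}
def pvBCodes : List (List (String × String)) → PySem.Set String → Option (PySem.Set String)
  | [], s => some s
  | port :: rest, s =>
    match (PySem.Dict.mk port).get? "code" with
    | some code => pvBCodes rest (PySem.Set.add s code)
    | none => none

-- inner loop: seen = deduped names of the ports whose code matches (and short-circuits the name lookup)
def pvBSeen (code : String) : List (List (String × String)) → List String → Option (List String)
  | [], seen => some seen
  | port :: rest, seen =>
    match (PySem.Dict.mk port).get? "code" with
    | none => none
    | some c =>
      if c = code then
        match (PySem.Dict.mk port).get? "name" with
        | none => none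
        | some n => pvBSeen code rest (if n ∈ seen then seen else seen ++ [n])
      else pvBSeen code rest seen

def pvBLines (ports : List (List (String × String))) : List String → Option (List String)
  | [] => some []
  | code :: rest =>
    match pvBSeen code ports [] with
    | none => none
    | some seen =>
      match pvBLines ports rest with
      | none => none
      | some ls => some (("- " ++ code ++ ": " ++ PySem.Str.join ", " seen) :: ls)

def get_port_reference_text_alt (ports : List (List (String × String))) (max_ports : Int) : String :=
  match pvBCodes ports PySem.Set.empty with
  | none => ""
  | some s =>
    let codes := PySem.List.slice (PySem.List.sorted s (fun x => x) false) none (some max_ports)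
    match pvBLines ports codes with
    | none => ""
    | some lines => PySem.Str.join "\n" lines

-- ===== PRECONDITION & SPEC =====
-- Pre_ excludes exactly the inputs where A raises KeyError: some port lacking a "code" or "name" key.
def Pre_get_port_reference_text (ports : List (List (String × String))) (max_ports : Int) : Prop :=
  ∀ port ∈ ports, ((PySem.Dict.mk port).get? "code").isSome ∧ ((PySem.Dict.mk port).get? "name").isSome
instance (ports : List (List (String × String))) (max_ports : Int) : Decidable (Pre_get_port_reference_text ports max_ports) := by unfold Pre_get_port_reference_text; infer_instance
def pvWitness_get_port_reference_text : (List (List (String × String))) × Int :=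
  ([[("code", "80"), ("name", "http")], [("code", "22"), ("name", "ssh")]], 30)

def Spec_get_port_reference_text (ports : List (List (String × String))) (max_ports : Int) (out : String) : Prop := out = get_port_reference_text_alt ports max_ports
instance (ports : List (List (String × String))) (max_ports : Int) (out : String) : Decidable (Spec_get_port_reference_text ports max_ports out) := by unfold Spec_get_port_reference_text; infer_instance

-- ===== CLAIM (what is proved, stated in full; the proofs are below) =====
def Claim_equal_get_port_reference_text : Prop := ∀ (ports : List (List (String × String))) (max_ports : Int), Dom_get_port_reference_text ports max_ports → Pre_get_port_reference_text ports max_ports → Spec_get_port_reference_text ports max_ports (get_port_reference_text ports max_ports)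

-- ===== LEMMAS AND PROOFS =====

-- the (code, name) pair a port contributes (defined for proofs; under Pre_ the lookups are `some`)
def pvPair (port : List (String × String)) : String × String :=
  (((PySem.Dict.mk port).get? "code").getD "", ((PySem.Dict.mk port).get? "name").getD "")

-- the pure per-code dedup step / group both proofs are phrased with
def pvGStep (c : String) (seen : List String) (p : String × String) : List String :=
  if p.1 = c then (if p.2 ∈ seen then seen else seen ++ [p.2]) else seen

def pvGrp (c : String) (L : List (String × String)) : List String := L.foldl (pvGStep c) []

theorem pvABuild_eq (ports : List (List (String × String)))
    (h : ∀ port ∈ ports, ((PySem.Dict.mk port).get? "code").isSome ∧ ((PySem.Dict.mk port).get? "name").isSome)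
    (m : PySem.Dict String (List String)) :
    pvABuild ports m = some ((ports.map pvPair).foldl (fun m p => pvAStep m p.1 p.2) m) := by
  induction ports generalizing m with
  | nil => rfl
  | cons port rest ih =>
    obtain ⟨hc, hn⟩ := h port (List.mem_cons_self)
    obtain ⟨code, hc'⟩ := Option.isSome_iff_exists.mp hc
    obtain ⟨name, hn'⟩ := Option.isSome_iff_exists.mp hn
    simp only [pvABuild, hc', hn', List.map_cons, List.foldl_cons, pvPair, Option.getD_some]
    exact ih (fun p hp => h p (List.mem_cons_of_mem _ hp)) _

theorem pvBCodes_eq (ports : List (List (String × String)))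
    (h : ∀ port ∈ ports, ((PySem.Dict.mk port).get? "code").isSome ∧ ((PySem.Dict.mk port).get? "name").isSome)
    (s : PySem.Set String) :
    pvBCodes ports s = some (List.foldl PySem.Set.add s ((ports.map pvPair).map Prod.fst)) := by
  induction ports generalizing s with
  | nil => rfl
  | cons port rest ih =>
    obtain ⟨hc, _⟩ := h port (List.mem_cons_self)
    obtain ⟨code, hc'⟩ := Option.isSome_iff_exists.mp hc
    simp only [pvBCodes, hc', List.map_cons, List.foldl_cons, pvPair, Option.getD_some]
    exact ih (fun p hp => h p (List.mem_cons_of_mem _ hp)) _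

theorem pvBSeen_eq (ports : List (List (String × String)))
    (h : ∀ port ∈ ports, ((PySem.Dict.mk port).get? "code").isSome ∧ ((PySem.Dict.mk port).get? "name").isSome)
    (c : String) (seen : List String) :
    pvBSeen c ports seen = some ((ports.map pvPair).foldl (pvGStep c) seen) := by
  induction ports generalizing seen with
  | nil => rfl
  | cons port rest ih =>
    obtain ⟨hc, hn⟩ := h port (List.mem_cons_self)
    obtain ⟨code, hc'⟩ := Option.isSome_iff_exists.mp hc
    obtain ⟨name, hn'⟩ := Option.isSome_iff_exists.mp hn
    have ih' := ih (fun p hp => h p (List.mem_cons_of_mem _ hp))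
    by_cases hcc : code = c
    · simp only [pvBSeen, hc', hn', List.map_cons, List.foldl_cons, pvPair, Option.getD_some,
        pvGStep, hcc]
      exact ih' _
    · simp only [pvBSeen, hc', hn', List.map_cons, List.foldl_cons, pvPair, Option.getD_some,
        pvGStep, if_neg hcc]
      exact ih' _

theorem pvBLines_eq (ports : List (List (String × String)))
    (h : ∀ port ∈ ports, ((PySem.Dict.mk port).get? "code").isSome ∧ ((PySem.Dict.mk port).get? "name").isSome)
    (codes : List String) :
    pvBLines ports codes =
      some (codes.map (fun c => "- " ++ c ++ ": " ++ PySem.Str.join ", " (pvGrp c (ports.map pvPair)))) := by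
  induction codes with
  | nil => rfl
  | cons c rest ih =>
    simp only [pvBLines, pvBSeen_eq ports h c [], ih, List.map_cons]
    rfl

theorem pvAStep_nodup (m : PySem.Dict String (List String)) (c n : String) (h : m.keys.Nodup) :
    (pvAStep m c n).keys.Nodup := by
  simp only [pvAStep]
  split_ifs <;>
    first
      | exact h
      | exact PySem.Dict.nodup_keys_insert _ _ _ h
      | exact PySem.Dict.nodup_keys_insert _ _ _ (PySem.Dict.nodup_keys_insert _ _ _ h)

theorem pvAStep_items_contains (m : PySem.Dict String (List String)) (c n : String)
    (hnd : m.keys.Nodup) (h : m.contains c = true) :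
    (pvAStep m c n).items = m.items.map (fun q => (q.1, pvGStep q.1 q.2 (c, n)))
      ∧ ∀ x, (pvAStep m c n).contains x = m.contains x := by
  have hs : (m.get? c).isSome := by rw [PySem.Dict.contains_eq_isSome_get?] at h; exact h
  obtain ⟨v, hv⟩ := Option.isSome_iff_exists.mp hs
  have hgd : m.getD c [] = v := PySem.Dict.getD_of_get?_eq_some m [] hv
  have key_eq : ∀ q ∈ m.items, q.1 = c → q.2 = v := by
    intro q hq hq1
    have e1 : m.get? c = some q.2 := by
      rw [← hq1]; exact PySem.Dict.get?_of_mem_items m (by simpa using hq) hnd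
    exact Option.some.inj (e1.symm.trans hv)
  simp only [pvAStep, h, if_pos, hgd]
  by_cases hn : n ∈ v
  · rw [if_pos hn]
    refine ⟨?_, fun x => rfl⟩
    conv_lhs => rw [← List.map_id m.items]
    apply List.map_congr_left
    rintro ⟨a, b⟩ hq
    by_cases hq1 : a = c
    · have h2 : b = v := key_eq (a, b) hq hq1
      simp [pvGStep, hq1, h2, hn]
    · have hcc : ¬ (c = a) := fun hh => hq1 hh.symm
      simp [pvGStep, hcc]
  · rw [if_neg hn]
    refine ⟨?_, ?_⟩
    · rw [PySem.Dict.items_insert_of_contains m _ h]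
      apply List.map_congr_left
      rintro ⟨a, b⟩ hq
      by_cases hq1 : a = c
      · have h2 : b = v := key_eq (a, b) hq hq1
        simp [pvGStep, hq1, h2, hn]
      · have hb : (a == c) = false := by simp [hq1]
        have hcc : ¬ (c = a) := fun hh => hq1 hh.symm
        simp [pvGStep, hb, hcc]
    · intro x
      rw [PySem.Dict.contains_insert]
      by_cases hx : x = c
      · subst hx; simp [h]
      · simp [hx]

theorem pvAStep_items_not_contains (m : PySem.Dict String (List String)) (c n : String)
    (h : m.contains c = false) :
    (pvAStep m c n).items = m.items ++ [(c, pvGStep c [] (c, n))]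
      ∧ ∀ x, (pvAStep m c n).contains x = (x == c || m.contains x) := by
  simp only [pvAStep, h, Bool.false_eq_true, PySem.Dict.getD_insert_self,
    List.not_mem_nil, if_false]
  rw [PySem.Dict.insert_insert_self]
  refine ⟨?_, ?_⟩
  · rw [PySem.Dict.items_insert_of_not_contains m _ h]
    simp [pvGStep]
  · intro x
    rw [PySem.Dict.contains_insert]

theorem pvFoldlAdd_eq (l : List String) (s : List String) :
    List.foldl PySem.Set.add s l = s ++ (PySem.List.dedup l).filter (fun c => !(s.contains c)) := by
  induction l generalizing s with
  | nil => simp [PySem.List.dedup, PySem.Set.ofList, PySem.Set.empty]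
  | cons c l ih =>
    have hded : PySem.List.dedup (c :: l) = c :: (PySem.List.dedup l).filter (fun x => !(decide (x = c))) := by
      show List.foldl PySem.Set.add PySem.Set.empty (c :: l) = _
      rw [List.foldl_cons, ih]
      simp [PySem.Set.add, PySem.Set.empty]
    rw [List.foldl_cons, ih, hded]
    by_cases hm : c ∈ s
    · have : PySem.Set.add s c = s := by simp [PySem.Set.add, hm]
      rw [this]
      simp only [List.filter_cons]
      have hc : (!s.contains c) = false := by simp [hm]
      rw [hc]
      simp only [Bool.false_eq_true]
      congr 1
      rw [List.filter_filter]
      apply List.filter_congr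
      intro x hx
      by_cases hxc : x = c
      · subst hxc; simp [hm]
      · simp [hxc]
    · have : PySem.Set.add s c = s ++ [c] := by simp [PySem.Set.add, hm]
      rw [this]
      simp only [List.filter_cons]
      have hc : (!s.contains c) = true := by simp [hm]
      rw [if_pos hc]
      rw [List.append_assoc, List.singleton_append, List.filter_filter]
      congr 2
      apply List.filter_congr
      intro x hx
      by_cases hxc : x = c
      · subst hxc; simp
      · simp [hxc]

theorem pvDedup_cons (c : String) (l : List String) :
    PySem.List.dedup (c :: l) = c :: (PySem.List.dedup l).filter (fun x => !(decide (x = c))) := by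
  show List.foldl PySem.Set.add PySem.Set.empty (c :: l) = _
  rw [List.foldl_cons]
  rw [pvFoldlAdd_eq]
  simp [PySem.Set.add, PySem.Set.empty]

theorem pvGrp_cons_ne (x c : String) (n : String) (L : List (String × String)) (h : x ≠ c) :
    pvGrp x ((c, n) :: L) = pvGrp x L := by
  unfold pvGrp
  rw [List.foldl_cons]
  have hcc : ¬ (c = x) := fun hh => h hh.symm
  have : pvGStep x [] (c, n) = [] := by simp [pvGStep, hcc]
  rw [this]

theorem pvItems_foldl (L : List (String × String)) (m : PySem.Dict String (List String))
    (hnd : m.keys.Nodup) :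
    (L.foldl (fun m p => pvAStep m p.1 p.2) m).items
      = m.items.map (fun q => (q.1, L.foldl (pvGStep q.1) q.2))
        ++ ((PySem.List.dedup (L.map Prod.fst)).filter (fun c => !(m.contains c))).map
             (fun c => (c, pvGrp c L)) := by
  induction L generalizing m with
  | nil => simp [PySem.List.dedup, PySem.Set.ofList, PySem.Set.empty]
  | cons p L ih =>
    obtain ⟨c, n⟩ := p
    rw [List.foldl_cons]
    have hnd' := pvAStep_nodup m c n hnd
    rw [ih (pvAStep m c n) hnd']
    by_cases hc : m.contains c = true
    · obtain ⟨hitems, hcont⟩ := pvAStep_items_contains m c n hnd hc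
      rw [hitems, List.map_map]
      simp only [List.map_cons, List.foldl_cons]
      congr 1
      rw [pvDedup_cons, List.filter_cons]
      have h0 : (!m.contains c) = false := by simp [hc]
      rw [h0]
      simp only [Bool.false_eq_true, if_false, List.filter_filter]
      have hfe : (PySem.List.dedup (L.map Prod.fst)).filter (fun x => !(pvAStep m c n).contains x)
          = (PySem.List.dedup (L.map Prod.fst)).filter (fun x => !(m.contains x) && !(decide (x = c))) := by
        apply List.filter_congr
        intro x _
        rw [hcont x]
        by_cases hxc : x = c
        · subst hxc; simp [hc]
        · simp [hxc]
      rw [hfe]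
      apply List.map_congr_left
      intro x hx
      have hne : x ≠ c := by
        have := (List.mem_filter.mp hx).2
        simp at this
        exact this.2
      rw [pvGrp_cons_ne x c n L hne]
    · have hc' : m.contains c = false := by simpa using hc
      obtain ⟨hitems, hcont⟩ := pvAStep_items_not_contains m c n hc'
      rw [hitems, List.map_append]
      simp only [List.map_cons, List.foldl_cons]
      have hkeyne : ∀ q ∈ m.items, q.1 ≠ c := by
        intro q hq hq1
        have : c ∈ m.keys := by
          rw [← hq1]
          exact List.mem_map_of_mem hq
        rw [PySem.Dict.contains_eq_decide_mem_keys] at hc'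
        simp at hc'
        exact hc' this
      rw [pvDedup_cons, List.filter_cons]
      have h1 : (!m.contains c) = true := by simp [hc']
      rw [if_pos h1]
      simp only [List.filter_filter]
      rw [List.append_assoc]
      congr 1
      · -- first chunks over m.items
        apply List.map_congr_left
        intro q hq
        have hcc : ¬ (c = q.1) := fun hh => hkeyne q hq hh.symm
        have : pvGStep q.1 q.2 (c, n) = q.2 := by simp [pvGStep, hcc]
        rw [this]
      · simp only [List.map_nil, List.map_cons]
        rw [List.singleton_append]
        congr 1
        · have hfe : (PySem.List.dedup (L.map Prod.fst)).filter (fun x => !(pvAStep m c n).contains x)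
              = (PySem.List.dedup (L.map Prod.fst)).filter (fun x => !(m.contains x) && !(decide (x = c))) := by
            apply List.filter_congr
            intro x _
            rw [hcont x]
            by_cases hxc : x = c
            · subst hxc; simp
            · simp [hxc]
          rw [hfe]
          apply List.map_congr_left
          intro x hx
          have hne : x ≠ c := by
            have := (List.mem_filter.mp hx).2
            simp at this
            exact this.2
          rw [pvGrp_cons_ne x c n L hne]

theorem pvGrp_ne_nil (L : List (String × String)) (c : String) (seen : List String)
    (h : c ∈ L.map Prod.fst ∨ seen ≠ []) : L.foldl (pvGStep c) seen ≠ [] := by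
  induction L generalizing seen with
  | nil =>
    rcases h with h | h
    · simp at h
    · simpa using h
  | cons p L ih =>
    rw [List.foldl_cons]
    by_cases hp : p.1 = c
    · apply ih
      right
      simp [pvGStep, hp]
      split_ifs with h1
      · intro hn; subst hn; simp at h1
      · simp
    · have : pvGStep c seen p = seen := by simp [pvGStep, (fun hh : p.1 = c => hp hh)]
      rw [this]
      apply ih
      rcases h with h | h
      · rw [List.map_cons, List.mem_cons] at h
        rcases h with h | h
        · exact absurd h (fun hh => hp hh.symm)
        · exact Or.inl h
      · exact Or.inr h

theorem pvSlice_map {α β : Type} (f : α → β) (xs : List α) (b : Int) :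
    PySem.List.slice (xs.map f) none (some b) = (PySem.List.slice xs none (some b)).map f := by
  simp [PySem.List.slice, PySem.List.clampIdx, List.map_take]

theorem pvJoin_singleton (x : String) : PySem.Str.join ", " [x] = x := by
  simp [PySem.Str.join, PySem.Chars.join, List.intercalate]

theorem pvALine_eq (c : String) (ns : List String) (h : ns ≠ []) :
    pvALine (c, ns) = "- " ++ c ++ ": " ++ PySem.Str.join ", " ns := by
  unfold pvALine
  by_cases h1 : ns.length = 1
  · obtain ⟨x, hx⟩ := List.length_eq_one_iff.mp h1
    subst hx
    simp [PySem.List.pyGet?, pvJoin_singleton, PySem.List.pyIdx?]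
  · simp [h1]

-- ===== VERDICT (by name: the statement is the Claim_ definition above) =====
theorem get_port_reference_text_spec : Claim_equal_get_port_reference_text := by
  intro ports max_ports _hdom hpre
  unfold Spec_get_port_reference_text
  unfold get_port_reference_text get_port_reference_text_alt
  rw [pvABuild_eq ports hpre, pvBCodes_eq ports hpre]
  simp only [List.map_map]
  rw [pvItems_foldl _ _ PySem.Dict.nodup_keys_empty]
  have hempty : (PySem.Dict.empty : PySem.Dict String (List String)).items = [] := rfl
  simp only [hempty, List.map_nil, List.nil_append, PySem.Dict.contains_empty, Bool.not_false,
    List.filter_true, List.map_map]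
  have hD : List.foldl PySem.Set.add PySem.Set.empty (List.map (Prod.fst ∘ pvPair) ports)
      = PySem.List.dedup (List.map (Prod.fst ∘ pvPair) ports) := rfl
  rw [hD]
  have hpw : List.Pairwise (fun a b : String × List String => a.1 < b.1)
      ((PySem.List.sorted (PySem.List.dedup (List.map (Prod.fst ∘ pvPair) ports)) (fun x => x) false).map
        (fun c => (c, pvGrp c (List.map pvPair ports)))) := by
    rw [List.pairwise_map]
    exact PySem.List.sorted_ofList_pairwise_lt (List.map (Prod.fst ∘ pvPair) ports)
  have hsorted := PySem.List.sorted_eq_of_perm_of_pairwise_lt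
    ((PySem.List.dedup (List.map (Prod.fst ∘ pvPair) ports)).map
        (fun c => (c, pvGrp c (List.map pvPair ports))))
    ((PySem.List.sorted (PySem.List.dedup (List.map (Prod.fst ∘ pvPair) ports)) (fun x => x) false).map
        (fun c => (c, pvGrp c (List.map pvPair ports))))
    (fun p => p.1) ((PySem.List.sorted_perm _ _ _).map _) hpw
  rw [hsorted, pvSlice_map, List.map_map, pvBLines_eq ports hpre]
  simp only []
  congr 1
  apply List.map_congr_left
  intro c hc
  have hcmem : c ∈ List.map (Prod.fst ∘ pvPair) ports := by
    have h1 := PySem.List.mem_of_mem_slice _ _ _ hc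
    rw [PySem.List.mem_sorted] at h1
    exact (PySem.List.mem_dedup _ _).mp h1
  have hcmem' : c ∈ (List.map pvPair ports).map Prod.fst := by
    rw [List.map_map]; exact hcmem
  have hne := pvGrp_ne_nil (List.map pvPair ports) c [] (Or.inl hcmem')
  exact pvALine_eq c _ hne
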